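-- pv_equiv track=rewrite | github.com/aorwall/moatless-tools | moatless/file_context.py | _process_diff_for_unidiff
-- ===== SOURCE A (Python) =====
-- def _process_diff_for_unidiff(diff_lines):
--     """
--     Process diff lines to ensure they're properly formatted for unidiff parsing.
--     Especially handles cases with consecutive blank lines.
--     """
--     if not diff_lines:
--         return ""
--
--     # Join with newlines and add a final newline
--     diff_text = "\n".join(diff_lines) + "\n"
--
--     # Fix hunk headers to match the actual content
--     # This is critical for handling consecutive blank lines correctly
--     fixed_lines = []
--     current_hunk_start = None
--     hunk_old_count = 0
--     hunk_new_count = 0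
--     actual_old_count = 0
--     actual_new_count = 0
--
--     for i, line in enumerate(diff_text.splitlines()):
--         # Detect hunk headers
--         if line.startswith("@@"):
--             # If we were processing a hunk, fix its header before starting a new one
--             if current_hunk_start is not None:
--                 # Fix the previous hunk header
--                 header_parts = fixed_lines[current_hunk_start].split()
--                 header_parts[1] = f"-{hunk_old_count},{actual_old_count}"
--                 header_parts[2] = f"+{hunk_new_count},{actual_new_count}"
--                 fixed_lines[current_hunk_start] = " ".join(header_parts)
--
--             # Start tracking a new hunk
--             current_hunk_start = len(fixed_lines)
--             fixed_lines.append(line)  # Add the header as a placeholder to be fixed later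
--
--             # Parse the hunk header to get expected counts
--             try:
--                 old_range = line.split()[1]
--                 new_range = line.split()[2]
--                 hunk_old_count = int(old_range.split(",")[0].lstrip("-"))
--                 hunk_new_count = int(new_range.split(",")[0].lstrip("+"))
--                 actual_old_count = 0
--                 actual_new_count = 0
--             except (IndexError, ValueError):
--                 # If parsing fails, use default values
--                 hunk_old_count = 0
--                 hunk_new_count = 0
--
--         else:
--             fixed_lines.append(line)
--
--             # Count lines
--             if current_hunk_start is not None:
--                 if line.startswith("+"):
--                     actual_new_count += 1
--                 elif line.startswith("-"):
--                     actual_old_count += 1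
--                 elif not line.startswith("\\"):  # Ignore "No newline" markers
--                     # Context lines count for both old and new
--                     actual_old_count += 1
--                     actual_new_count += 1
--
--     # Fix the last hunk header if there was one
--     if current_hunk_start is not None:
--         header_parts = fixed_lines[current_hunk_start].split()
--         header_parts[1] = f"-{hunk_old_count},{actual_old_count}"
--         header_parts[2] = f"+{hunk_new_count},{actual_new_count}"
--         fixed_lines[current_hunk_start] = " ".join(header_parts)
--
--     return "\n".join(fixed_lines) + "\n"
-- ===== SOURCE B (Python) =====
-- def _process_diff_for_unidiff(diff_lines):
--     """Normalise a unified diff so each hunk header's line counts match the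
--     hunk's actual body: split the text into a preamble plus (header, body)
--     segments, count each body, and rebuild its header."""
--     if not diff_lines:
--         return ""
--
--     lines = ("\n".join(diff_lines) + "\n").splitlines()
--
--     idx = 0
--     preamble = []
--     while idx < len(lines) and not lines[idx].startswith("@@"):
--         preamble.append(lines[idx])
--         idx += 1
--
--     hunks = []
--     while idx < len(lines):
--         header = lines[idx]
--         idx += 1
--         body = []
--         while idx < len(lines) and not lines[idx].startswith("@@"):
--             body.append(lines[idx])
--             idx += 1
--         hunks.append((header, body))
--
--     out = list(preamble)
--     for header, body in hunks:
--         try: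
--             parts = header.split()
--             old_start = int(parts[1].partition(",")[0].lstrip("-"))
--             new_start = int(parts[2].partition(",")[0].lstrip("+"))
--         except (IndexError, ValueError):
--             old_start = 0
--             new_start = 0
--         old_count = 0
--         new_count = 0
--         for line in body:
--             if line.startswith("+"):
--                 new_count += 1
--             elif line.startswith("-"):
--                 old_count += 1
--             elif not line.startswith("\\"):
--                 old_count += 1
--                 new_count += 1
--         parts = header.split()
--         parts[1] = f"-{old_start},{old_count}"
--         parts[2] = f"+{new_start},{new_count}"
--         out.append(" ".join(parts))
--         out.extend(body)
--
--     return "\n".join(out) + "\n"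
-- ===== Notes on version B (the rewrite author's own statement) =====
-- stated objective: alternative
-- what changed: B partitions the diff into a preamble plus (header, body) hunk segments and rebuilds each header from its own segment's counts, instead of A's flat back-patching loop with cross-hunk counter state; Pre_ excludes hunk headers with fewer than 3 whitespace tokens, on which both programs raise IndexError.
-- intended difference: On diffs containing a hunk header whose line ranges fail int() parsing and which is preceded, since the last successfully parsed header, by at least one counted body line, A rebuilds that header with line counts carried over from the previous hunk (e.g. '@@ -0,2 +0,2 @@' for a one-line hunk), while B rebuilds it from the hunk's own body ('@@ -0,1 +0,1 @@'), the intended counts. — e.g. on _process_diff_for_unidiff(["@@ -1,1 +1,1 @@", "x", "@@ -q,1 +1,1 @@", "y"]): A returns "@@ -1,1 +1,1 @@\nx\n@@ -0,2 +0,2 @@\ny\n", B returns "@@ -1,1 +1,1 @@\nx\n@@ -0,1 +0,1 @@\ny\n"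
import Mathlib
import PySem

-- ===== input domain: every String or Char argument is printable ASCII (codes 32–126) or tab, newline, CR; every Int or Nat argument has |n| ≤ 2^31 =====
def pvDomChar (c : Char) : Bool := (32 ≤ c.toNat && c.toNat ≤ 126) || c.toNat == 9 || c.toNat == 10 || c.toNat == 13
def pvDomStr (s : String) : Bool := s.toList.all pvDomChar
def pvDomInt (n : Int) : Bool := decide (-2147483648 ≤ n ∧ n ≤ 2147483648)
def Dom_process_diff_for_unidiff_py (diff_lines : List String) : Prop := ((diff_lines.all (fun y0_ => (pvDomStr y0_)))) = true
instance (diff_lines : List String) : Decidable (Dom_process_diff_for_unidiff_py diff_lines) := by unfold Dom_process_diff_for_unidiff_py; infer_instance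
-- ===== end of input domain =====

-- B regroups the diff into preamble + per-hunk segments and rebuilds each header from its own
-- hunk's counts (alternative decomposition, same cost); on hunks whose header fails to parse, B
-- counts from zero instead of inheriting the previous hunk's counters (the stated difference D_).

-- ===== shared shape helpers (used by both ports, Pre_ and D_) =====

-- the line list Python iterates over: "\n".join(diff_lines) + "\n", then str.splitlines
def pvLines (diff_lines : List String) : List String :=
  PySem.Str.splitlines (PySem.Str.join "\n" diff_lines ++ "\n")

-- s.lstrip("-") / s.lstrip("+")  (exact: drops exactly the leading '-' / '+' characters)
def lstripDash (s : String) : String := String.ofList (s.toList.dropWhile (· == '-'))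
def lstripPlus (s : String) : String := String.ofList (s.toList.dropWhile (· == '+'))

-- the try-block of A: int(line.split()[1].split(",")[0].lstrip("-")), same for "+";
-- none = the caught IndexError/ValueError
def parseHd (line : String) : Option (Int × Int) :=
  match PySem.List.pyGet? (PySem.Str.split₀ line) 1, PySem.List.pyGet? (PySem.Str.split₀ line) 2 with
  | some oldR, some newR =>
    match PySem.Int.ofStr? (lstripDash (((PySem.Str.split? oldR ",").getD []).headD "")),
          PySem.Int.ofStr? (lstripPlus (((PySem.Str.split? newR ",").getD []).headD "")) with
    | some o, some n => some (o, n)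
    | _, _ => none
  | _, _ => none

-- header_parts = s.split(); header_parts[1] = f"-{ho},{ao}"; header_parts[2] = f"+{hn},{an}";
-- " ".join(header_parts)   (the parts[1]=/parts[2]= IndexError on short headers is excluded by Pre_)
def rebuildHd (s : String) (ho ao hn an : Int) : String :=
  PySem.Str.join " "
    (((PySem.Str.split₀ s).set 1 (String.ofList ('-' :: (PySem.Int.toChars ho ++ ',' :: PySem.Int.toChars ao)))).set 2
      (String.ofList ('+' :: (PySem.Int.toChars hn ++ ',' :: PySem.Int.toChars an))))

-- ===== PORT A =====

structure AState where
  fixed : List String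
  cur : Option Nat
  ho : Int
  hn : Int
  ao : Int
  an : Int

def stepA (st : AState) (line : String) : AState :=
  if PySem.Str.startswith line "@@" then
    let fixed1 := match st.cur with
      | some c => st.fixed.set c (rebuildHd (st.fixed.getD c "") st.ho st.ao st.hn st.an)
      | none => st.fixed
    match parseHd line with
    | some (o, n) => ⟨fixed1 ++ [line], some fixed1.length, o, n, 0, 0⟩
    | none => ⟨fixed1 ++ [line], some fixed1.length, 0, 0, st.ao, st.an⟩
  else
    if st.cur.isSome then
      if PySem.Str.startswith line "+" then ⟨st.fixed ++ [line], st.cur, st.ho, st.hn, st.ao, st.an + 1⟩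
      else if PySem.Str.startswith line "-" then ⟨st.fixed ++ [line], st.cur, st.ho, st.hn, st.ao + 1, st.an⟩
      else if PySem.Str.startswith line "\\" then ⟨st.fixed ++ [line], st.cur, st.ho, st.hn, st.ao, st.an⟩
      else ⟨st.fixed ++ [line], st.cur, st.ho, st.hn, st.ao + 1, st.an + 1⟩
    else ⟨st.fixed ++ [line], st.cur, st.ho, st.hn, st.ao, st.an⟩

def finishA (st : AState) : List String :=
  match st.cur with
  | some c => st.fixed.set c (rebuildHd (st.fixed.getD c "") st.ho st.ao st.hn st.an)
  | none => st.fixed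

def process_diff_for_unidiff_py (diff_lines : List String) : String :=
  if diff_lines = [] then ""
  else PySem.Str.join "\n" (finishA ((pvLines diff_lines).foldl stepA ⟨[], none, 0, 0, 0, 0⟩)) ++ "\n"

-- ===== PORT B =====

-- Source B's try-block: int(parts[1].partition(",")[0].lstrip("-")) etc.; none = the caught error
-- (partition(",")[0] is the text before the first comma = takeWhile (· ≠ ','), exact)
def parseHdB (line : String) : Option (Int × Int) :=
  (PySem.List.pyGet? (PySem.Str.split₀ line) 1).bind fun oldR =>
  (PySem.List.pyGet? (PySem.Str.split₀ line) 2).bind fun newR =>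
  (PySem.Int.ofStr? (String.ofList ((oldR.toList.takeWhile (· ≠ ',')).dropWhile (· == '-')))).bind fun o =>
  (PySem.Int.ofStr? (String.ofList ((newR.toList.takeWhile (· ≠ ',')).dropWhile (· == '+')))).map fun n => (o, n)


def notHeader (l : String) : Bool := !(PySem.Str.startswith l "@@")

-- the grouping while-loop of Source B; the Nat fuel (initialised to the list length, always
-- sufficient) only makes the recursion structural
def groupHunksF : Nat → List String → List (String × List String)
  | _, [] => []
  | 0, _ :: _ => []
  | fuel + 1, h :: t => (h, t.takeWhile notHeader) :: groupHunksF fuel (t.dropWhile notHeader)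

def groupHunks (r : List String) : List (String × List String) := groupHunksF r.length r

def pvHunks (diff_lines : List String) : List (String × List String) :=
  groupHunks ((PySem.Str.splitlines (PySem.Str.join "\n" diff_lines ++ "\n")).dropWhile notHeader)

def countBody (body : List String) (ao an : Int) : Int × Int :=
  body.foldl (fun c line =>
    if PySem.Str.startswith line "+" then (c.1, c.2 + 1)
    else if PySem.Str.startswith line "-" then (c.1 + 1, c.2)
    else if PySem.Str.startswith line "\\" then c
    else (c.1 + 1, c.2 + 1)) (ao, an)

def fixHunk (g : String × List String) : List String :=
  let sn := (parseHdB g.1).getD (0, 0)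
  let c := countBody g.2 0 0
  rebuildHd g.1 sn.1 c.1 sn.2 c.2 :: g.2

def process_diff_for_unidiff_py_alt (diff_lines : List String) : String :=
  if diff_lines = [] then ""
  else
    let pre := (pvLines diff_lines).takeWhile notHeader
    PySem.Str.join "\n" (pre ++ ((pvHunks diff_lines).map fixHunk).flatten) ++ "\n"

-- ===== PRECONDITION & SPEC =====

-- Pre_ excludes exactly the inputs where A raises an uncaught IndexError: a line starting with
-- "@@" that has fewer than 3 whitespace-separated tokens (header_parts[1]/[2] assignment fails).
def Pre_process_diff_for_unidiff_py (diff_lines : List String) : Prop :=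
  ∀ l ∈ PySem.Str.splitlines (PySem.Str.join "\n" diff_lines ++ "\n"),
    PySem.Str.startswith l "@@" = true → 3 ≤ (PySem.Str.split₀ l).length
instance (diff_lines : List String) : Decidable (Pre_process_diff_for_unidiff_py diff_lines) := by
  unfold Pre_process_diff_for_unidiff_py; infer_instance

def pvWitness_process_diff_for_unidiff_py : List String := ["@@ -1,1 +1,1 @@", "x"]

-- a hunk-header line whose "-<int>,..." / "+<int>,..." range tokens do not both parse as ints
def dFail (line : String) : Bool :=
  let ts := PySem.Chars.split₀ line.toList
  decide (ts.length < 3)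
    || ((PySem.Int.ofChars? (((ts[1]?.getD []).span (fun c => c == '-')).2.takeWhile (fun c => !(c == ',')))) == none)
    || ((PySem.Int.ofChars? (((ts[2]?.getD []).span (fun c => c == '+')).2.takeWhile (fun c => !(c == ',')))) == none)

-- scans the diff's lines: true iff some unparsable hunk header is preceded, since the last
-- successfully parsed header, by at least one counted (non-backslash) body line
def dScan : List String → Bool → Bool → Bool
  | [], _, _ => false
  | l :: rest, seen, carry =>
    if PySem.Str.startswith l "@@" then
      if dFail l then (carry || dScan rest true carry)
      else dScan rest true false
    else dScan rest seen (carry || (seen && !PySem.Str.startswith l "\\"))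

-- On a hunk whose header fails to parse (int() ValueError) preceded, since the last successfully
-- parsed header, by at least one counted body line, A rebuilds that header with line counts carried
-- over from the previous hunk, while B counts the hunk's own body from zero, the intended counts.
def D_process_diff_for_unidiff_py (diff_lines : List String) : Prop :=
  dScan ((PySem.Chars.splitlines
      (PySem.Chars.join ['\n'] (diff_lines.map String.toList) ++ ['\n'])).map String.ofList)
    false false = true
instance (diff_lines : List String) : Decidable (D_process_diff_for_unidiff_py diff_lines) := by
  unfold D_process_diff_for_unidiff_py; infer_instance

def Spec_process_diff_for_unidiff_py (diff_lines : List String) (out : String) : Prop :=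
  ¬ D_process_diff_for_unidiff_py diff_lines → out = process_diff_for_unidiff_py_alt diff_lines
instance (diff_lines : List String) (out : String) : Decidable (Spec_process_diff_for_unidiff_py diff_lines out) := by
  unfold Spec_process_diff_for_unidiff_py; infer_instance

def pvDiffWitness_process_diff_for_unidiff_py : List String :=
  ["@@ -1,1 +1,1 @@", "x", "@@ -q,1 +1,1 @@", "y"]
def pvDiffWitnessOut_process_diff_for_unidiff_py : String × String :=
  ("@@ -1,1 +1,1 @@\nx\n@@ -0,2 +0,2 @@\ny\n", "@@ -1,1 +1,1 @@\nx\n@@ -0,1 +0,1 @@\ny\n")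

-- ===== CLAIM (what is proved, stated in full; the proofs are below) =====
def Claim_unchanged_process_diff_for_unidiff_py : Prop :=
  ∀ (diff_lines : List String), Dom_process_diff_for_unidiff_py diff_lines →
    Pre_process_diff_for_unidiff_py diff_lines →
    Spec_process_diff_for_unidiff_py diff_lines (process_diff_for_unidiff_py diff_lines)

def Claim_changed_process_diff_for_unidiff_py : Prop :=
  Dom_process_diff_for_unidiff_py (pvDiffWitness_process_diff_for_unidiff_py) ∧
  Pre_process_diff_for_unidiff_py (pvDiffWitness_process_diff_for_unidiff_py) ∧
  D_process_diff_for_unidiff_py (pvDiffWitness_process_diff_for_unidiff_py) ∧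
  process_diff_for_unidiff_py (pvDiffWitness_process_diff_for_unidiff_py) = pvDiffWitnessOut_process_diff_for_unidiff_py.1 ∧
  process_diff_for_unidiff_py_alt (pvDiffWitness_process_diff_for_unidiff_py) = pvDiffWitnessOut_process_diff_for_unidiff_py.2 ∧
  pvDiffWitnessOut_process_diff_for_unidiff_py.1 ≠ pvDiffWitnessOut_process_diff_for_unidiff_py.2

def Claim_exact_process_diff_for_unidiff_py : Prop :=
  ∀ (diff_lines : List String), Dom_process_diff_for_unidiff_py diff_lines →
    Pre_process_diff_for_unidiff_py diff_lines →
    D_process_diff_for_unidiff_py diff_lines →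
    process_diff_for_unidiff_py diff_lines ≠ process_diff_for_unidiff_py_alt diff_lines

-- ===== LEMMAS AND PROOFS =====

-- decimal rendering: characterisation and injectivity (for the tightness proof)
theorem toDigitsCore_eq : ∀ (f n : Nat) (acc : List Char), n < f →
    Nat.toDigitsCore 10 f n acc =
      (if n = 0 then ['0'] else ((Nat.digits 10 n).map Nat.digitChar).reverse) ++ acc := by
  intro f
  induction f with
  | zero => intro n acc h; omega
  | succ f ih =>
    intro n acc h
    rw [show Nat.toDigitsCore 10 (f+1) n acc
        = if n / 10 = 0 then Nat.digitChar (n % 10) :: acc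
          else Nat.toDigitsCore 10 f (n / 10) (Nat.digitChar (n % 10) :: acc) from by
      simp [Nat.toDigitsCore]]
    by_cases h0 : n / 10 = 0
    · rw [if_pos h0]
      by_cases hn : n = 0
      · subst hn; simp [Nat.digitChar]
      · have hlt : n < 10 := by omega
        rw [if_neg hn, Nat.digits_of_lt 10 n hn hlt]
        simp [Nat.mod_eq_of_lt hlt]
    · rw [if_neg h0]
      have hn : n ≠ 0 := by omega
      have hrec : n / 10 < f := by omega
      rw [ih (n / 10) _ hrec, if_neg h0]
      rw [Nat.digits_def' (by norm_num : (1:Nat) < 10) (by omega : 0 < n)]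
      rw [if_neg hn]
      simp

theorem natToDigits_eq (m : Nat) :
    Nat.toDigits 10 m = if m = 0 then ['0'] else ((Nat.digits 10 m).map Nat.digitChar).reverse := by
  rw [show Nat.toDigits 10 m = Nat.toDigitsCore 10 (m+1) m [] from rfl,
    toDigitsCore_eq (m+1) m [] (by omega)]
  simp

theorem digitChar_inj : ∀ {a b : Nat}, a < 10 → b < 10 → Nat.digitChar a = Nat.digitChar b → a = b := by
  have h : ∀ a : Fin 10, ∀ b : Fin 10, Nat.digitChar a = Nat.digitChar b → (a:Nat) = b := by decide
  intro a b ha hb he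
  exact h ⟨a, ha⟩ ⟨b, hb⟩ he

theorem mapDC_inj : ∀ xs ys : List Nat, (∀ x ∈ xs, x < 10) → (∀ y ∈ ys, y < 10) →
    xs.map Nat.digitChar = ys.map Nat.digitChar → xs = ys := by
  intro xs
  induction xs with
  | nil => intro ys _ _ h; cases ys <;> simp_all
  | cons x t ih =>
    intro ys hx hy h
    cases ys with
    | nil => simp at h
    | cons y u =>
      simp only [List.map_cons, List.cons.injEq] at h
      have := digitChar_inj (hx x (by simp)) (hy y (by simp)) h.1
      rw [this, ih u (fun z hz => hx z (by simp [hz])) (fun z hz => hy z (by simp [hz])) h.2]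

theorem natToDigits_inj {a b : Nat} (h : Nat.toDigits 10 a = Nat.toDigits 10 b) : a = b := by
  rw [natToDigits_eq, natToDigits_eq] at h
  by_cases ha : a = 0 <;> by_cases hb : b = 0
  · omega
  · exfalso
    rw [if_pos ha, if_neg hb] at h
    have : Nat.digits 10 b = [0] := by
      have := congrArg List.reverse h
      simp at this
      cases hd : Nat.digits 10 b with
      | nil => rw [hd] at this; simp at this
      | cons d t =>
        rw [hd] at this
        cases t with
        | nil =>
          simp at this
          have hd10 : d < 10 := Nat.digits_lt_base (by norm_num) (by rw [hd]; simp)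
          have := digitChar_inj (a:=0) (b:=d) (by norm_num) hd10
            (by rw [show Nat.digitChar 0 = '0' from rfl]; exact this)
          simp [← this]
        | cons d2 t2 => simp at this
    have := Nat.ofDigits_digits 10 b
    rw [this.symm, ‹Nat.digits 10 b = [0]›] at hb
    simp [Nat.ofDigits] at hb
  · exfalso
    rw [if_neg ha, if_pos hb] at h
    have : Nat.digits 10 a = [0] := by
      have := congrArg List.reverse h
      simp at this
      cases hd : Nat.digits 10 a with
      | nil => rw [hd] at this; simp at this
      | cons d t =>
        rw [hd] at this
        cases t with
        | nil =>
          simp at this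
          have hd10 : d < 10 := Nat.digits_lt_base (by norm_num) (by rw [hd]; simp)
          have := digitChar_inj (a:=d) (b:=0) hd10 (by norm_num)
            (by rw [show Nat.digitChar 0 = '0' from rfl]; exact this)
          simp [this]
        | cons d2 t2 => simp at this
    have := Nat.ofDigits_digits 10 a
    rw [this.symm, ‹Nat.digits 10 a = [0]›] at ha
    simp [Nat.ofDigits] at ha
  · rw [if_neg ha, if_neg hb] at h
    have := congrArg List.reverse h
    simp only [List.reverse_reverse] at this
    have hdig := mapDC_inj _ _ (fun d hd => Nat.digits_lt_base (by norm_num) hd)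
      (fun d hd => Nat.digits_lt_base (by norm_num) hd) this
    exact Nat.digits_inj_iff.mp hdig

theorem toChars_inj {a b : Int} (ha : 0 ≤ a) (hb : 0 ≤ b)
    (h : PySem.Int.toChars a = PySem.Int.toChars b) : a = b := by
  unfold PySem.Int.toChars at h
  rw [if_neg (by omega), if_neg (by omega)] at h
  have := natToDigits_inj h
  omega

-- chars of Nat.toDigits are never whitespace
theorem natToDigits_nonspace {m : Nat} {c : Char} (hc : c ∈ Nat.toDigits 10 m) :
    PySem.Chars.isspace c = false := by
  rw [natToDigits_eq] at hc
  by_cases hm : m = 0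
  · rw [if_pos hm] at hc; simp at hc; subst hc; decide
  · rw [if_neg hm] at hc
    simp at hc
    obtain ⟨d, hd, hdc⟩ := hc
    have hd10 : d < 10 := Nat.digits_lt_base (by norm_num) hd
    have : ∀ d : Fin 10, PySem.Chars.isspace (Nat.digitChar d) = false := by decide
    rw [← hdc]
    exact this ⟨d, hd10⟩

theorem toChars_nonspace {n : Int} {c : Char} (hc : c ∈ PySem.Int.toChars n) :
    PySem.Chars.isspace c = false := by
  unfold PySem.Int.toChars at hc
  by_cases hn : n < 0
  · rw [if_pos hn] at hc
    rcases hc with _ | hc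
    · decide
    · exact natToDigits_nonspace (by assumption)
  · rw [if_neg hn] at hc
    exact natToDigits_nonspace hc

-- every token s.split() produces is whitespace-free
theorem split₀go_nonspace : ∀ (s cur : List Char) (acc : List (List Char)),
    (∀ c ∈ cur, PySem.Chars.isspace c = false) →
    (∀ t ∈ acc, ∀ c ∈ t, PySem.Chars.isspace c = false) →
    ∀ t ∈ PySem.Chars.split₀.go s cur acc, ∀ c ∈ t, PySem.Chars.isspace c = false := by
  intro s
  induction s with
  | nil =>
    intro cur acc hcur hacc t ht
    unfold PySem.Chars.split₀.go at ht
    by_cases he : cur.isEmpty = true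
    · rw [if_pos he] at ht
      exact hacc t (by simpa using ht)
    · rw [if_neg he] at ht
      rw [List.mem_reverse, List.mem_cons] at ht
      rcases ht with ht | ht
      · subst ht; intro c hc; exact hcur c (by simpa using hc)
      · exact hacc t ht
  | cons a rest ih =>
    intro cur acc hcur hacc t ht
    unfold PySem.Chars.split₀.go at ht
    by_cases hs : PySem.Chars.isspace a = true
    · rw [if_pos hs] at ht
      by_cases he : cur.isEmpty = true
      · rw [if_pos he] at ht
        exact ih [] acc (by simp) hacc t ht
      · rw [if_neg he] at ht
        refine ih [] _ (by simp) ?_ t ht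
        intro u hu
        rcases List.mem_cons.mp hu with hu | hu
        · subst hu; intro c hc; exact hcur c (by simpa using hc)
        · exact hacc u hu
    · rw [if_neg hs] at ht
      refine ih (a :: cur) acc ?_ hacc t ht
      intro c hc
      rcases List.mem_cons.mp hc with hc | hc
      · subst hc; simpa using hs
      · exact hcur c hc

theorem split₀_nonspace (s : List Char) :
    ∀ t ∈ PySem.Chars.split₀ s, ∀ c ∈ t, PySem.Chars.isspace c = false := by
  exact split₀go_nonspace s [] [] (by simp) (by simp)

-- membership in a single-char join
theorem mem_join_single {x : Char} {parts : List (List Char)} {c : Char}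
    (hc : c ∈ PySem.Chars.join [x] parts) : c = x ∨ ∃ p ∈ parts, c ∈ p := by
  induction parts with
  | nil => rw [PySem.Chars.join_nil] at hc; simp at hc
  | cons p rest ih =>
    cases rest with
    | nil =>
      rw [PySem.Chars.join_singleton] at hc
      exact Or.inr ⟨p, by simp, hc⟩
    | cons q t =>
      rw [PySem.Chars.join_cons_cons] at hc
      simp only [List.mem_append, List.mem_singleton] at hc
      rcases hc with (hc | hc) | hc
      · exact Or.inr ⟨p, by simp, hc⟩
      · exact Or.inl hc
      · rcases ih hc with h | ⟨u, hu, hcu⟩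
        · exact Or.inl h
        · exact Or.inr ⟨u, by simp only [List.mem_cons] at hu ⊢; tauto, hcu⟩

theorem splitlines_go_free (isB : Char → Bool) : ∀ (s cur : List Char) (acc : List (List Char)),
    (∀ c ∈ cur, isB c = false) →
    (∀ t ∈ acc, ∀ c ∈ t, isB c = false) →
    ∀ t ∈ PySem.Chars.splitlines.go isB s cur acc, ∀ c ∈ t, isB c = false := by
  intro s cur acc hcur hacc
  fun_induction PySem.Chars.splitlines.go isB s cur acc
  case case1 cur acc h =>
    intro t ht
    exact hacc t (List.mem_reverse.mp ht)
  case case2 cur acc h =>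
    intro t ht
    rw [List.mem_reverse, List.mem_cons] at ht
    rcases ht with ht | ht
    · subst ht; intro c hc; exact hcur c (by simpa using hc)
    · exact hacc t ht
  case case3 rest cur acc ih =>
    refine ih (by simp) ?_
    intro u hu
    rcases List.mem_cons.mp hu with hu | hu
    · subst hu; intro c hc; exact hcur c (by simpa using hc)
    · exact hacc u hu
  case case4 c0 rest cur acc hx hb ih =>
    refine ih (by simp) ?_
    intro u hu
    rcases List.mem_cons.mp hu with hu | hu
    · subst hu; intro c hc; exact hcur c (by simpa using hc)
    · exact hacc u hu
  case case5 c0 rest cur acc hx hb ih =>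
    refine ih ?_ hacc
    intro c hc
    rcases List.mem_cons.mp hc with hc | hc
    · subst hc; simpa using hb
    · exact hcur c hc



-- A's back-patched result, computed hunk-by-hunk but with the counters carried exactly as A does
def fixHunksCarry : List (String × List String) → Int → Int → List String
  | [], _, _ => []
  | (h2, b2) :: t, ao, an =>
    let s := match parseHd h2 with
      | some (o, n) => (o, n, (0 : Int), (0 : Int))
      | none => (0, 0, ao, an)
    let c := countBody b2 s.2.2.1 s.2.2.2
    (rebuildHd h2 s.1 c.1 s.2.1 c.2 :: b2) ++ fixHunksCarry t c.1 c.2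

def hunksWF (gs : List (String × List String)) : Prop :=
  ∀ g ∈ gs, PySem.Str.startswith g.1 "@@" = true ∧ ∀ l ∈ g.2, PySem.Str.startswith l "@@" = false

theorem set_len_append {α : Type} (F : List α) (h x : α) (B : List α) :
    (F ++ h :: B).set F.length x = F ++ x :: B := by
  induction F with
  | nil => rfl
  | cons a F ih => simpa using ih

theorem getD_len_append (F : List String) (h : String) (B : List String) (d : String) :
    (F ++ h :: B).getD F.length d = h := by
  induction F with
  | nil => rfl
  | cons a F ih => simpa using ih

theorem foldl_pre (pre : List String) (hp : ∀ l ∈ pre, PySem.Str.startswith l "@@" = false) :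
    ∀ (G : List String) (a b c d : Int),
      pre.foldl stepA ⟨G, none, a, b, c, d⟩ = ⟨G ++ pre, none, a, b, c, d⟩ := by
  induction pre with
  | nil => simp
  | cons x xs ih =>
    intro G a b c d
    have hx := hp x (by simp)
    simp only [List.foldl_cons, stepA, hx]
    simp only [Bool.false_eq_true, if_false, Option.isSome_none]
    rw [ih (fun l hl => hp l (by simp [hl]))]
    simp

theorem foldl_body (b : List String) (hb : ∀ l ∈ b, PySem.Str.startswith l "@@" = false) :
    ∀ (G : List String) (c : Nat) (ho hn ao an : Int),
      b.foldl stepA ⟨G, some c, ho, hn, ao, an⟩ =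
        ⟨G ++ b, some c, ho, hn, (countBody b ao an).1, (countBody b ao an).2⟩ := by
  induction b with
  | nil => simp [countBody]
  | cons x xs ih =>
    intro G c ho hn ao an
    have hx := hb x (by simp)
    have hxs : ∀ l ∈ xs, PySem.Str.startswith l "@@" = false := fun l hl => hb l (by simp [hl])
    simp only [List.foldl_cons, stepA, hx, Bool.false_eq_true, if_false, Option.isSome_some,
      if_true, countBody]
    cases h1 : PySem.Str.startswith x "+" <;>
      [skip; (rw [if_pos rfl]; rw [ih hxs]; simp [countBody, h1])]
    rw [if_neg (by simp [h1])]
    cases h2 : PySem.Str.startswith x "-" <;>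
      [skip; (rw [if_pos rfl]; rw [ih hxs]; simp [countBody, h1, h2])]
    rw [if_neg (by simp [h2])]
    cases h3 : PySem.Str.startswith x "\\" <;>
      [(rw [if_neg (by simp [h3])]; rw [ih hxs]; simp [countBody, h1, h2, h3]);
       (rw [if_pos rfl]; rw [ih hxs]; simp [countBody, h1, h2, h3])]

def flattenHunks (gs : List (String × List String)) : List String :=
  (gs.map (fun g => g.1 :: g.2)).flatten

theorem dropWhile_head_false {α : Type} (p : α → Bool) :
    ∀ (l : List α) (x : α) (xs : List α), l.dropWhile p = x :: xs → p x = false := by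
  intro l
  induction l with
  | nil => intro x xs h; simp at h
  | cons a t ih =>
    intro x xs h
    by_cases hp : p a = true
    · rw [List.dropWhile_cons_of_pos hp] at h; exact ih x xs h
    · rw [List.dropWhile_cons_of_neg hp] at h
      cases h; simpa using hp

theorem flatten_groupHunksF : ∀ (n : Nat) (r : List String), r.length ≤ n →
    flattenHunks (groupHunksF n r) = r := by
  intro n
  induction n with
  | zero =>
    intro r hr
    cases r with
    | nil => rfl
    | cons h t => simp at hr
  | succ n ih =>
    intro r hr
    cases r with
    | nil => rfl
    | cons h t =>
      have hlen : (t.dropWhile notHeader).length ≤ n := by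
        have := List.length_dropWhile_le notHeader t
        simp at hr; omega
      simp only [groupHunksF, flattenHunks, List.map_cons, List.flatten_cons]
      rw [show (List.map (fun g => g.1 :: g.2) (groupHunksF n (t.dropWhile notHeader))).flatten
            = flattenHunks (groupHunksF n (t.dropWhile notHeader)) from rfl, ih _ hlen]
      simp [List.takeWhile_append_dropWhile]

theorem wf_groupHunksF : ∀ (n : Nat) (r : List String),
    (∀ x ∈ r.head?, PySem.Str.startswith x "@@" = true) → hunksWF (groupHunksF n r) := by
  intro n
  induction n with
  | zero =>
    intro r hr
    cases r with
    | nil => intro g hg; simp [groupHunksF] at hg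
    | cons h t => intro g hg; simp [groupHunksF] at hg
  | succ n ih =>
    intro r hr
    cases r with
    | nil => intro g hg; simp [groupHunksF] at hg
    | cons h t =>
      intro g hg
      simp only [groupHunksF, List.mem_cons] at hg
      rcases hg with hg | hg
      · subst hg
        refine ⟨hr h (by simp), ?_⟩
        intro l hl
        have := List.mem_takeWhile_imp hl
        simpa [notHeader] using this
      · refine ih (t.dropWhile notHeader) ?_ g hg
        intro x hx
        cases hd : t.dropWhile notHeader with
        | nil => rw [hd] at hx; simp at hx
        | cons y ys =>
          rw [hd] at hx; simp at hx; subst hx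
          have := dropWhile_head_false notHeader t y ys hd
          simpa [notHeader] using this

theorem wf_groupHunks : ∀ r : List String,
    (∀ x ∈ r.head?, PySem.Str.startswith x "@@" = true) → hunksWF (groupHunks r) := by
  intro r hr; exact wf_groupHunksF r.length r hr

theorem foldHunks : ∀ gs : List (String × List String), hunksWF gs →
    ∀ (F : List String) (h : String) (B : List String) (ho hn ao an : Int),
      finishA ((flattenHunks gs).foldl stepA ⟨F ++ h :: B, some F.length, ho, hn, ao, an⟩) =
        F ++ (rebuildHd h ho ao hn an :: B) ++ fixHunksCarry gs ao an := by
  intro gs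
  induction gs with
  | nil =>
    intro _ F h B ho hn ao an
    simp only [flattenHunks, List.map_nil, List.flatten_nil, List.foldl_nil, finishA,
      fixHunksCarry, List.append_nil]
    rw [getD_len_append, set_len_append]
  | cons g t ih =>
    obtain ⟨h2, b2⟩ := g
    intro hwf F h B ho hn ao an
    have hh2 : PySem.Str.startswith h2 "@@" = true := (hwf (h2, b2) (by simp)).1
    have hb2 : ∀ l ∈ b2, PySem.Str.startswith l "@@" = false := (hwf (h2, b2) (by simp)).2
    have hwt : hunksWF t := fun g hg => hwf g (List.mem_cons_of_mem _ hg)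
    have hflat : flattenHunks ((h2, b2) :: t) = h2 :: (b2 ++ flattenHunks t) := by
      simp [flattenHunks]
    rw [hflat, List.foldl_cons]
    rcases hp : parseHd h2 with _ | ⟨o, n⟩
    · have hstep : stepA ⟨F ++ h :: B, some F.length, ho, hn, ao, an⟩ h2 =
          ⟨(F ++ rebuildHd h ho ao hn an :: B) ++ [h2],
           some (F ++ rebuildHd h ho ao hn an :: B).length, 0, 0, ao, an⟩ := by
        simp only [stepA, hh2, if_true]
        rw [getD_len_append, set_len_append, hp]
      rw [hstep, List.foldl_append, foldl_body b2 hb2]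
      have hG : ((F ++ rebuildHd h ho ao hn an :: B) ++ [h2]) ++ b2 =
          (F ++ rebuildHd h ho ao hn an :: B) ++ h2 :: b2 := by simp
      rw [hG, ih hwt (F ++ rebuildHd h ho ao hn an :: B) h2 b2 0 0
            (countBody b2 ao an).1 (countBody b2 ao an).2]
      simp only [fixHunksCarry, hp]
      simp [List.append_assoc]
    · have hstep : stepA ⟨F ++ h :: B, some F.length, ho, hn, ao, an⟩ h2 =
          ⟨(F ++ rebuildHd h ho ao hn an :: B) ++ [h2],
           some (F ++ rebuildHd h ho ao hn an :: B).length, o, n, 0, 0⟩ := by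
        simp only [stepA, hh2, if_true]
        rw [getD_len_append, set_len_append, hp]
      rw [hstep, List.foldl_append, foldl_body b2 hb2]
      have hG : ((F ++ rebuildHd h ho ao hn an :: B) ++ [h2]) ++ b2 =
          (F ++ rebuildHd h ho ao hn an :: B) ++ h2 :: b2 := by simp
      rw [hG, ih hwt (F ++ rebuildHd h ho ao hn an :: B) h2 b2 o n
            (countBody b2 0 0).1 (countBody b2 0 0).2]
      simp only [fixHunksCarry, hp]
      simp [List.append_assoc]

theorem countBody_const (b : List String) (hb : ∀ l ∈ b, PySem.Str.startswith l "\\" = true) :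
    ∀ ao an, countBody b ao an = (ao, an) := by
  induction b with
  | nil => intro ao an; rfl
  | cons x xs ih =>
    intro ao an
    have hx := hb x (by simp)
    have h1 : PySem.Str.startswith x "+" = false := by
      cases h : PySem.Str.startswith x "+"
      · rfl
      · exfalso
        rcases (PySem.Chars.startswith_iff _ _).mp (by simpa using h) with ⟨t1, e1⟩
        rcases (PySem.Chars.startswith_iff _ _).mp (by simpa using hx) with ⟨t2, e2⟩
        rw [← e1] at e2; simp at e2
    have h2 : PySem.Str.startswith x "-" = false := by
      cases h : PySem.Str.startswith x "-"
      · rfl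
      · exfalso
        rcases (PySem.Chars.startswith_iff _ _).mp (by simpa using h) with ⟨t1, e1⟩
        rcases (PySem.Chars.startswith_iff _ _).mp (by simpa using hx) with ⟨t2, e2⟩
        rw [← e1] at e2; simp at e2
    have hstep : countBody (x :: xs) ao an = countBody xs ao an := by
      have h1' : PySem.Chars.startswith x.toList ['+'] = false := by simpa using h1
      have h2' : PySem.Chars.startswith x.toList ['-'] = false := by simpa using h2
      have hx' : PySem.Chars.startswith x.toList ['\\'] = true := by simpa using hx
      simp only [countBody, List.foldl_cons]
      simp [h1', h2', hx']
    rw [hstep, ih (fun l hl => hb l (by simp [hl]))]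

theorem pvHunks_eq (dl : List String) :
    pvHunks dl = groupHunks ((pvLines dl).dropWhile notHeader) := rfl

theorem go_acc : ∀ (fuel : Nat) (l cur : List Char) (acc : List (List Char)) (x : List Char),
    ∃ r, PySem.Chars.splitOn.go [','] fuel l cur (acc ++ [x]) = x :: r := by
  intro fuel
  induction fuel with
  | zero =>
    intro l cur acc x
    exact ⟨acc.reverse ++ [cur.reverse ++ l], by simp [PySem.Chars.splitOn.go]⟩
  | succ n ih =>
    intro l cur acc x
    cases l with
    | nil => exact ⟨acc.reverse ++ [cur.reverse], by simp [PySem.Chars.splitOn.go]⟩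
    | cons c rest =>
      by_cases hp : List.isPrefixOf [','] (c :: rest) = true
      · obtain ⟨r, hr⟩ := ih (List.drop 1 (c :: rest)) [] (cur.reverse :: acc) x
        refine ⟨r, ?_⟩
        rw [show PySem.Chars.splitOn.go [','] (n + 1) (c :: rest) cur (acc ++ [x])
            = PySem.Chars.splitOn.go [','] n (List.drop 1 (c :: rest)) []
                (cur.reverse :: (acc ++ [x])) from by simp [PySem.Chars.splitOn.go, hp]]
        rw [show cur.reverse :: (acc ++ [x]) = (cur.reverse :: acc) ++ [x] from rfl]
        exact hr
      · obtain ⟨r, hr⟩ := ih rest (c :: cur) acc x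
        refine ⟨r, ?_⟩
        rw [show PySem.Chars.splitOn.go [','] (n + 1) (c :: rest) cur (acc ++ [x])
            = PySem.Chars.splitOn.go [','] n rest (c :: cur) (acc ++ [x]) from by
          simp [PySem.Chars.splitOn.go, hp]]
        exact hr

theorem go_head : ∀ (fuel : Nat) (l cur : List Char), l.length < fuel →
    ∃ r, PySem.Chars.splitOn.go [','] fuel l cur []
      = (cur.reverse ++ l.takeWhile (· ≠ ',')) :: r := by
  intro fuel
  induction fuel with
  | zero => intro l cur h; omega
  | succ n ih =>
    intro l cur h
    cases l with
    | nil => exact ⟨[], by simp [PySem.Chars.splitOn.go]⟩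
    | cons c rest =>
      by_cases hp : List.isPrefixOf [','] (c :: rest) = true
      · have hc0 : ',' = c := by simpa [List.isPrefixOf] using hp
        have hc : c = ',' := hc0.symm
        obtain ⟨r, hr⟩ := go_acc n rest [] [] cur.reverse
        refine ⟨r, ?_⟩
        rw [show PySem.Chars.splitOn.go [','] (n + 1) (c :: rest) cur []
            = PySem.Chars.splitOn.go [','] n rest [] ([] ++ [cur.reverse]) from by
          simp [PySem.Chars.splitOn.go, hp]]
        rw [hr]
        simp [hc]
      · have hc0 : ¬ ',' = c := by simpa [List.isPrefixOf] using hp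
        have hc : ¬ c = ',' := fun h => hc0 h.symm
        obtain ⟨r, hr⟩ := ih rest (c :: cur) (by simpa using Nat.lt_of_succ_lt_succ h)
        refine ⟨r, ?_⟩
        rw [show PySem.Chars.splitOn.go [','] (n + 1) (c :: rest) cur []
            = PySem.Chars.splitOn.go [','] n rest (c :: cur) [] from by
          simp [PySem.Chars.splitOn.go, hp]]
        rw [hr]
        simp [hc]

theorem partition_head (s : String) :
    ((PySem.Str.split? s ",").getD []).headD "" = String.ofList (s.toList.takeWhile (· ≠ ',')) := by
  obtain ⟨r, hr⟩ := go_head (s.toList.length + 1) s.toList [] (Nat.lt_succ_self _)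
  simp only [List.reverse_nil, List.nil_append] at hr
  simp only [PySem.Str.split?, PySem.Chars.split?, PySem.Chars.splitOn]
  simp only [show (",".toList : List Char) = [','] from rfl, List.isEmpty_cons,
    Option.map_some, Option.getD_some]
  simp at hr
  simp [hr]

theorem opt_pair_eq (a b : Option Int) :
    (a.bind fun o => b.map fun n => ((o, n) : Int × Int)) =
      (match a, b with | some o, some n => some (o, n) | _, _ => none) := by
  cases a <;> cases b <;> rfl

theorem parseHdB_eq : ∀ l, parseHdB l = parseHd l := by
  intro l
  unfold parseHdB parseHd lstripDash lstripPlus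
  cases PySem.List.pyGet? (PySem.Str.split₀ l) 1 with
  | none => rfl
  | some o =>
    cases PySem.List.pyGet? (PySem.Str.split₀ l) 2 with
    | none => rfl
    | some n =>
      dsimp only [Option.bind_some]
      rw [partition_head o, partition_head n]
      simp only [String.toList_ofList]
      exact opt_pair_eq _ _

theorem opt_isNone (p q : Option Int) :
    (p.isNone || q.isNone)
      = (match p, q with | some o, some n => some ((o, n) : Int × Int) | _, _ => none).isNone := by
  cases p <;> cases q <;> rfl

theorem comma_lam : (fun c : Char => !(c == ',')) = (fun c => decide (c ≠ ',')) := by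
  funext c; by_cases h : c = ',' <;> simp [h]

theorem strip_cut_comm (sgn : Char) (hs : sgn ≠ ',') : ∀ cs : List Char,
    (cs.dropWhile (· == sgn)).takeWhile (fun c => decide (c ≠ ','))
      = (cs.takeWhile (fun c => decide (c ≠ ','))).dropWhile (· == sgn) := by
  intro cs
  induction cs with
  | nil => rfl
  | cons c r ih =>
    by_cases hc : c = sgn
    · subst hc
      rw [List.dropWhile_cons_of_pos (by simp), List.takeWhile_cons_of_pos (by simp [hs]),
        List.dropWhile_cons_of_pos (by simp)]
      exact ih
    · rw [List.dropWhile_cons_of_neg (by simp [hc])]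
      by_cases hcc : c = ','
      · simp [List.takeWhile_cons, hcc]
      · simp [List.takeWhile_cons, List.dropWhile_cons, hcc, hc]

theorem dFail_eq (l : String) : dFail l = (parseHd l).isNone := by
  unfold dFail parseHd lstripDash lstripPlus
  rw [show PySem.Chars.split₀ l.toList = List.map String.toList (PySem.Str.split₀ l) from
    (PySem.Str.split₀_map_toList l).symm]
  cases hxs : PySem.Str.split₀ l with
  | nil => simp [PySem.List.pyGet?, PySem.List.pyIdx?]
  | cons a t0 =>
    cases t0 with
    | nil => simp [PySem.List.pyGet?, PySem.List.pyIdx?]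
    | cons o t1 =>
      cases t1 with
      | nil => simp [PySem.List.pyGet?, PySem.List.pyIdx?]
      | cons n t2 =>
        have h1 : PySem.List.pyGet? (a :: o :: n :: t2) 1 = some o := by
          simp [PySem.List.pyGet?, PySem.List.pyIdx?,
            show ((1 : Int) < (t2.length : Int) + 1 + 1 + 1) from by push_cast; omega]
        have h2 : PySem.List.pyGet? (a :: o :: n :: t2) 2 = some n := by
          simp [PySem.List.pyGet?, PySem.List.pyIdx?,
            show ((2 : Int) < (t2.length : Int) + 1 + 1 + 1) from by push_cast; omega]
        rw [h1, h2]
        dsimp only [List.map_cons]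
        rw [partition_head o, partition_head n]
        simp only [String.toList_ofList, PySem.Int.ofStr?, List.span_eq_takeWhile_dropWhile,
          comma_lam]
        rw [show (((a.toList :: o.toList :: n.toList :: List.map String.toList t2)[1]?).getD [])
            = o.toList from rfl,
          show (((a.toList :: o.toList :: n.toList :: List.map String.toList t2)[2]?).getD [])
            = n.toList from rfl,
          strip_cut_comm '-' (by decide) o.toList, strip_cut_comm '+' (by decide) n.toList]
        have hlen : decide ((a.toList :: o.toList :: n.toList :: List.map String.toList t2).length < 3)
            = false := by simp
        rw [hlen]
        simp only [Bool.false_or]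
        rw [show ∀ (x : Option Int), (x == none) = x.isNone from fun x => by cases x <;> rfl,
          show ∀ (x : Option Int), (x == none) = x.isNone from fun x => by cases x <;> rfl]
        exact opt_isNone _ _

def DgB : List (String × List String) → Bool → Bool
  | [], _ => false
  | (h, b) :: t, carry =>
    if (parseHd h).isNone then
      (carry || DgB t (carry || b.any (fun x => !PySem.Str.startswith x "\\")))
    else DgB t (b.any (fun x => !PySem.Str.startswith x "\\"))

theorem scan_pre (pre : List String) (hp : ∀ l ∈ pre, PySem.Str.startswith l "@@" = false) :
    ∀ rest, dScan (pre ++ rest) false false = dScan rest false false := by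
  induction pre with
  | nil => intro rest; rfl
  | cons x xs ih =>
    intro rest
    have hx : PySem.Chars.startswith x.toList ['@', '@'] = false := by
      simpa using hp x (by simp)
    rw [List.cons_append]
    rw [show dScan (x :: (xs ++ rest)) false false = dScan (xs ++ rest) false false from by
      simp [dScan, hx]]
    exact ih (fun l hl => hp l (by simp [hl])) rest

theorem scan_body (b : List String) (hb : ∀ l ∈ b, PySem.Str.startswith l "@@" = false) :
    ∀ (rest : List String) (carry : Bool),
      dScan (b ++ rest) true carry
        = dScan rest true (carry || b.any (fun x => !PySem.Str.startswith x "\\")) := by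
  induction b with
  | nil => intro rest carry; simp
  | cons x xs ih =>
    intro rest carry
    have hx : PySem.Chars.startswith x.toList ['@', '@'] = false := by
      simpa using hb x (by simp)
    rw [List.cons_append]
    rw [show dScan (x :: (xs ++ rest)) true carry
        = dScan (xs ++ rest) true (carry || !PySem.Str.startswith x "\\") from by
      simp [dScan, hx]]
    rw [ih (fun l hl => hb l (by simp [hl]))]
    simp [Bool.or_assoc]

theorem scan_hunks : ∀ gs : List (String × List String), hunksWF gs →
    ∀ carry, dScan (flattenHunks gs) true carry = DgB gs carry := by
  intro gs
  induction gs with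
  | nil => intro _ carry; rfl
  | cons g t ih =>
    obtain ⟨h2, b2⟩ := g
    intro hwf carry
    have hh2 : PySem.Chars.startswith h2.toList ['@', '@'] = true := by
      simpa using (hwf (h2, b2) (by simp)).1
    have hb2 : ∀ l ∈ b2, PySem.Str.startswith l "@@" = false := (hwf (h2, b2) (by simp)).2
    have hwt : hunksWF t := fun g hg => hwf g (List.mem_cons_of_mem _ hg)
    have hflat : flattenHunks ((h2, b2) :: t) = h2 :: (b2 ++ flattenHunks t) := by
      simp [flattenHunks]
    rw [hflat]
    cases hp : (parseHd h2).isNone with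
    | true =>
      rw [show dScan (h2 :: (b2 ++ flattenHunks t)) true carry
          = (carry || dScan (b2 ++ flattenHunks t) true carry) from by
        simp [dScan, hh2, dFail_eq, hp]]
      rw [scan_body b2 hb2, ih hwt]
      simp [DgB, hp]
    | false =>
      rw [show dScan (h2 :: (b2 ++ flattenHunks t)) true carry
          = dScan (b2 ++ flattenHunks t) true false from by
        simp [dScan, hh2, dFail_eq, hp]]
      rw [scan_body b2 hb2, ih hwt]
      simp [DgB, hp]

theorem countBody_any_false (b : List String)
    (hb : b.any (fun x => !PySem.Str.startswith x "\\") = false) :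
    ∀ ao an, countBody b ao an = (ao, an) := by
  apply countBody_const
  intro l hl
  have := List.any_eq_false.mp hb l hl
  simpa using this

theorem clean_of_DgB : ∀ (gs : List (String × List String)) (ao an : Int) (c : Bool),
    (c = false → ao = 0 ∧ an = 0) → DgB gs c = false →
    fixHunksCarry gs ao an = (gs.map fixHunk).flatten := by
  intro gs
  induction gs with
  | nil => intro ao an c _ _; rfl
  | cons g t ih =>
    obtain ⟨h2, b2⟩ := g
    intro ao an c hc hD
    rcases hpp : parseHd h2 with _ | ⟨o, n⟩
    · simp only [DgB, hpp, Option.isNone_none, if_true, Bool.or_eq_false_iff] at hD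
      obtain ⟨hc0, hDt⟩ := hD
      obtain ⟨hao, han⟩ := hc hc0
      subst hao han hc0
      simp only [fixHunksCarry, hpp, List.map_cons, List.flatten_cons]
      rw [ih (countBody b2 0 0).1 (countBody b2 0 0).2
            (b2.any (fun x => !PySem.Str.startswith x "\\"))
            (fun h => by rw [countBody_any_false b2 h 0 0]; exact ⟨rfl, rfl⟩)
            (by simpa using hDt)]
      simp [fixHunk, parseHdB_eq, hpp]
    · simp only [DgB, hpp, Option.isNone_some, if_false] at hD
      simp only [fixHunksCarry, hpp, List.map_cons, List.flatten_cons]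
      rw [ih (countBody b2 0 0).1 (countBody b2 0 0).2
            (b2.any (fun x => !PySem.Str.startswith x "\\"))
            (fun h => by rw [countBody_any_false b2 h 0 0]; exact ⟨rfl, rfl⟩)
            hD]
      simp [fixHunk, parseHdB_eq, hpp]

-- A's result list is the preamble followed by the carry-threaded hunk rebuild
theorem A_eq_carry (dl : List String) :
    finishA ((pvLines dl).foldl stepA ⟨[], none, 0, 0, 0, 0⟩) =
      (pvLines dl).takeWhile notHeader ++ fixHunksCarry (pvHunks dl) 0 0 := by
  have hsplit : (pvLines dl).takeWhile notHeader ++ (pvLines dl).dropWhile notHeader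
      = pvLines dl := List.takeWhile_append_dropWhile
  have hpref : ∀ l ∈ (pvLines dl).takeWhile notHeader,
      PySem.Str.startswith l "@@" = false := by
    intro l hl
    have := List.mem_takeWhile_imp hl
    simpa [notHeader] using this
  conv_lhs => rw [← hsplit]
  rw [List.foldl_append, foldl_pre _ hpref, List.nil_append]
  cases hd : (pvLines dl).dropWhile notHeader with
  | nil =>
    simp only [pvHunks_eq, hd, List.foldl_nil, finishA, groupHunks, groupHunksF]
    simp [fixHunksCarry]
  | cons h1 t1 =>
    have hh1 : PySem.Str.startswith h1 "@@" = true := by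
      have := dropWhile_head_false notHeader (pvLines dl) h1 t1 hd
      simpa [notHeader] using this
    have hgs : pvHunks dl =
        (h1, t1.takeWhile notHeader) :: groupHunksF t1.length (t1.dropWhile notHeader) := by
      simp [pvHunks_eq, hd, groupHunks, groupHunksF]
    have hwf1 : ∀ l ∈ t1.takeWhile notHeader, PySem.Str.startswith l "@@" = false := by
      intro l hl
      have := List.mem_takeWhile_imp hl
      simpa [notHeader] using this
    have hwft : hunksWF (groupHunksF t1.length (t1.dropWhile notHeader)) := by
      intro g hg
      have hwf : hunksWF (pvHunks dl) := by
        rw [pvHunks_eq, hd]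
        apply wf_groupHunks
        intro x hx; simp at hx; subst hx; exact hh1
      exact hwf g (by rw [hgs]; exact List.mem_cons_of_mem _ hg)
    have ht1 : t1 = t1.takeWhile notHeader ++
        flattenHunks (groupHunksF t1.length (t1.dropWhile notHeader)) := by
      rw [flatten_groupHunksF t1.length _ (List.length_dropWhile_le _ _),
        List.takeWhile_append_dropWhile]
    set P := (pvLines dl).takeWhile notHeader with hP
    rcases hp1 : parseHd h1 with _ | ⟨o, n⟩
    · have hstep : stepA ⟨P, none, 0, 0, 0, 0⟩ h1 = ⟨P ++ [h1], some P.length, 0, 0, 0, 0⟩ := by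
        simp only [stepA, hh1, if_true, hp1]
      rw [List.foldl_cons, hstep]
      conv_lhs => rw [ht1]
      rw [List.foldl_append, foldl_body _ hwf1]
      have hG : (P ++ [h1]) ++ t1.takeWhile notHeader = P ++ h1 :: t1.takeWhile notHeader := by
        simp
      rw [hG, foldHunks _ hwft P h1 (t1.takeWhile notHeader) 0 0 _ _, hgs]
      simp only [fixHunksCarry, hp1]
      simp [List.append_assoc]
    · have hstep : stepA ⟨P, none, 0, 0, 0, 0⟩ h1 = ⟨P ++ [h1], some P.length, o, n, 0, 0⟩ := by
        simp only [stepA, hh1, if_true, hp1]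
      rw [List.foldl_cons, hstep]
      conv_lhs => rw [ht1]
      rw [List.foldl_append, foldl_body _ hwf1]
      have hG : (P ++ [h1]) ++ t1.takeWhile notHeader = P ++ h1 :: t1.takeWhile notHeader := by
        simp
      rw [hG, foldHunks _ hwft P h1 (t1.takeWhile notHeader) o n _ _, hgs]
      simp only [fixHunksCarry, hp1]
      simp [List.append_assoc]

theorem dlines_eq (dl : List String) :
    (PySem.Chars.splitlines
        (PySem.Chars.join ['\n'] (dl.map String.toList) ++ ['\n'])).map String.ofList
      = pvLines dl := by
  unfold pvLines
  rw [PySem.Str.splitlines]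
  congr 1
  rw [show (PySem.Str.join "\n" dl ++ "\n").toList
      = (PySem.Str.join "\n" dl).toList ++ "\n".toList from by simp]
  rw [show ("\n".toList : List Char) = ['\n'] from rfl]
  congr 1
  simpa using (PySem.Str.toList_join "\n" dl)

theorem process_diff_for_unidiff_py_spec : Claim_unchanged_process_diff_for_unidiff_py := by
  unfold Claim_unchanged_process_diff_for_unidiff_py
  intro dl _ _
  unfold Spec_process_diff_for_unidiff_py
  intro hnd
  by_cases hnil : dl = []
  · subst hnil; rfl
  · have hscan : dScan (pvLines dl) false false = false := by
      unfold D_process_diff_for_unidiff_py at hnd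
      rw [dlines_eq dl] at hnd
      exact Bool.not_eq_true _ ▸ Bool.eq_false_iff.mpr hnd
    have hclean : fixHunksCarry (pvHunks dl) 0 0 = ((pvHunks dl).map fixHunk).flatten := by
      cases hd : (pvLines dl).dropWhile notHeader with
      | nil => simp [pvHunks_eq, hd, groupHunks, groupHunksF, fixHunksCarry]
      | cons h1 t1 =>
        have hh1 : PySem.Str.startswith h1 "@@" = true := by
          have := dropWhile_head_false notHeader (pvLines dl) h1 t1 hd
          simpa [notHeader] using this
        have hgs : pvHunks dl =
            (h1, t1.takeWhile notHeader) :: groupHunksF t1.length (t1.dropWhile notHeader) := by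
          simp [pvHunks_eq, hd, groupHunks, groupHunksF]
        have hwf1 : ∀ l ∈ t1.takeWhile notHeader, PySem.Str.startswith l "@@" = false := by
          intro l hl
          have := List.mem_takeWhile_imp hl
          simpa [notHeader] using this
        have hwft : hunksWF (groupHunksF t1.length (t1.dropWhile notHeader)) := by
          intro g hg
          have hwf : hunksWF (pvHunks dl) := by
            rw [pvHunks_eq, hd]
            apply wf_groupHunks
            intro x hx; simp at hx; subst hx; exact hh1
          exact hwf g (by rw [hgs]; exact List.mem_cons_of_mem _ hg)
        have hflat : flattenHunks (groupHunksF t1.length (t1.dropWhile notHeader))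
            = t1.dropWhile notHeader :=
          flatten_groupHunksF t1.length _ (List.length_dropWhile_le _ _)
        have hpref : ∀ l ∈ (pvLines dl).takeWhile notHeader,
            PySem.Str.startswith l "@@" = false := by
          intro l hl
          have := List.mem_takeWhile_imp hl
          simpa [notHeader] using this
        -- drive the scanner through preamble, first header, its body, then the remaining hunks
        rw [← List.takeWhile_append_dropWhile (p := notHeader) (l := pvLines dl), hd,
          scan_pre _ hpref] at hscan
        have hh1' : PySem.Chars.startswith h1.toList ['@', '@'] = true := by simpa using hh1
        have hscan2 : dScan t1 true false = false := by
          cases hdf : dFail h1 with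
          | true => simpa [dScan, hh1', hdf] using hscan
          | false => simpa [dScan, hh1', hdf] using hscan
        rw [← List.takeWhile_append_dropWhile (p := notHeader) (l := t1), ← hflat,
          scan_body _ hwf1, scan_hunks _ hwft] at hscan2
        simp only [Bool.false_or] at hscan2
        -- now rebuild hunk by hunk
        rw [hgs]
        rcases hp1 : parseHd h1 with _ | ⟨obegin, nbegin⟩ <;>
          simp only [fixHunksCarry, hp1, List.map_cons, List.flatten_cons] <;>
          rw [clean_of_DgB _ (countBody (t1.takeWhile notHeader) 0 0).1
                (countBody (t1.takeWhile notHeader) 0 0).2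
                ((t1.takeWhile notHeader).any (fun x => !PySem.Str.startswith x "\\"))
                (fun h => by rw [countBody_any_false _ h 0 0]; exact ⟨rfl, rfl⟩)
                hscan2] <;>
          simp [fixHunk, parseHdB_eq, hp1]
    unfold process_diff_for_unidiff_py process_diff_for_unidiff_py_alt
    rw [if_neg hnil, if_neg hnil, A_eq_carry dl, hclean]

theorem process_diff_for_unidiff_py_changed : Claim_changed_process_diff_for_unidiff_py := by
  unfold Claim_changed_process_diff_for_unidiff_py; decide

-- ===== counting lemmas for the tightness proof =====

theorem countBody_shift : ∀ (b : List String) (ao an : Int),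
    countBody b ao an = (ao + (countBody b 0 0).1, an + (countBody b 0 0).2) := by
  intro b
  induction b with
  | nil => intro ao an; simp [countBody]
  | cons x t ih =>
    intro ao an
    have hx : ∀ u v : Int, countBody (x :: t) u v =
        if PySem.Str.startswith x "+" then countBody t u (v + 1)
        else if PySem.Str.startswith x "-" then countBody t (u + 1) v
        else if PySem.Str.startswith x "\\" then countBody t u v
        else countBody t (u + 1) (v + 1) := by
      intro u v
      simp only [countBody, List.foldl_cons]
      split_ifs <;> rfl
    rw [hx, hx]
    split_ifs
    · rw [ih ao (an + 1), ih 0 (0 + 1)]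
      simp only [Prod.mk.injEq]
      omega
    · rw [ih (ao + 1) an, ih (0 + 1) 0]
      simp only [Prod.mk.injEq]
      omega
    · exact ih ao an
    · rw [ih (ao + 1) (an + 1), ih (0 + 1) (0 + 1)]
      simp only [Prod.mk.injEq]
      omega

theorem countBody_base_nonneg : ∀ b : List String,
    0 ≤ (countBody b 0 0).1 ∧ 0 ≤ (countBody b 0 0).2 := by
  intro b
  induction b with
  | nil => simp [countBody]
  | cons x t ih =>
    have hx : ∀ u v : Int, countBody (x :: t) u v =
        if PySem.Str.startswith x "+" then countBody t u (v + 1)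
        else if PySem.Str.startswith x "-" then countBody t (u + 1) v
        else if PySem.Str.startswith x "\\" then countBody t u v
        else countBody t (u + 1) (v + 1) := by
      intro u v
      simp only [countBody, List.foldl_cons]
      split_ifs <;> rfl
    rw [hx]
    split_ifs <;> rw [countBody_shift] <;> omega

theorem countBody_base_pos : ∀ b : List String,
    b.any (fun x => !PySem.Str.startswith x "\\") = true →
    0 < (countBody b 0 0).1 + (countBody b 0 0).2 := by
  intro b
  induction b with
  | nil => intro h; simp at h
  | cons x t ih =>
    intro h
    have hx : ∀ u v : Int, countBody (x :: t) u v =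
        if PySem.Str.startswith x "+" then countBody t u (v + 1)
        else if PySem.Str.startswith x "-" then countBody t (u + 1) v
        else if PySem.Str.startswith x "\\" then countBody t u v
        else countBody t (u + 1) (v + 1) := by
      intro u v
      simp only [countBody, List.foldl_cons]
      split_ifs <;> rfl
    rw [hx]
    have hnn := countBody_base_nonneg t
    by_cases hb : PySem.Str.startswith x "\\" = true
    · have hrest : t.any (fun x => !PySem.Str.startswith x "\\") = true := by
        simp only [List.any_cons, hb] at h
        simpa using h
      split_ifs <;> rw [countBody_shift] <;> have := ih hrest <;> omega
    · split_ifs <;> rw [countBody_shift] <;> omega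

-- ===== the rebuilt header determines its two counts (for the tightness proof) =====

theorem numtok_nonspace (sgn : Char) (hs : PySem.Chars.isspace sgn = false) (v w : Int) :
    ∀ c ∈ (sgn :: (PySem.Int.toChars v ++ ',' :: PySem.Int.toChars w)),
      PySem.Chars.isspace c = false := by
  intro c hc
  rcases List.mem_cons.mp hc with hc | hc
  · subst hc; exact hs
  · rcases List.mem_append.mp hc with hc | hc
    · exact toChars_nonspace hc
    · rcases List.mem_cons.mp hc with hc | hc
      · subst hc; decide
      · exact toChars_nonspace hc

theorem headNe (h : String) (a1 a2 b1 b2 : Int)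
    (ha1 : 0 ≤ a1) (ha2 : 0 ≤ a2) (hb1 : 0 ≤ b1) (hb2 : 0 ≤ b2)
    (hlen : 3 ≤ (PySem.Str.split₀ h).length)
    (hne : ¬(a1 = b1 ∧ a2 = b2)) :
    rebuildHd h 0 a1 0 a2 ≠ rebuildHd h 0 b1 0 b2 := by
  intro heq
  have htl := congrArg String.toList heq
  unfold rebuildHd at htl
  rw [PySem.Str.toList_join, PySem.Str.toList_join] at htl
  simp only [List.map_set, String.toList_ofList] at htl
  rw [show (" " : String).toList = [' '] from rfl] at htl
  set L := List.map String.toList (PySem.Str.split₀ h) with hL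
  have hLlen : 3 ≤ L.length := by rw [hL, List.length_map]; exact hlen
  have hLns : ∀ t ∈ L, ∀ c ∈ t, PySem.Chars.isspace c = false := by
    intro t ht
    rw [hL, PySem.Str.split₀_map_toList] at ht
    exact split₀_nonspace h.toList t ht
  have key : ∀ (u v : Int),
      ∀ l ∈ ((L.set 1 ('-' :: (PySem.Int.toChars 0 ++ ',' :: PySem.Int.toChars u))).set 2
          ('+' :: (PySem.Int.toChars 0 ++ ',' :: PySem.Int.toChars v))), (' ' : Char) ∉ l := by
    intro u v l hl hsp
    rcases List.mem_or_eq_of_mem_set hl with hl | hl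
    · rcases List.mem_or_eq_of_mem_set hl with hl | hl
      · have := hLns l hl ' ' hsp
        simp [PySem.Chars.isspace] at this
      · subst hl
        have := numtok_nonspace '-' (by decide) 0 u ' ' hsp
        simp [PySem.Chars.isspace] at this
    · subst hl
      have := numtok_nonspace '+' (by decide) 0 v ' ' hsp
      simp [PySem.Chars.isspace] at this
  have hnnil : ∀ (u v : Int),
      ((L.set 1 ('-' :: (PySem.Int.toChars 0 ++ ',' :: PySem.Int.toChars u))).set 2
          ('+' :: (PySem.Int.toChars 0 ++ ',' :: PySem.Int.toChars v))) ≠ [] := by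
    intro u v hc
    have hle := congrArg List.length hc
    simp only [List.length_set, List.length_nil] at hle
    omega
  rw [show ∀ P, PySem.Chars.join [' '] P = [' '].intercalate P from fun _ => rfl,
      show ∀ P, PySem.Chars.join [' '] P = [' '].intercalate P from fun _ => rfl] at htl
  have hsets := congrArg (List.splitOn ' ') htl
  rw [List.splitOn_intercalate _ ' ' (key a1 a2) (hnnil a1 a2),
      List.splitOn_intercalate _ ' ' (key b1 b2) (hnnil b1 b2)] at hsets
  have h1lt : (1 : Nat) < L.length := by omega
  have h2lt : (2 : Nat) < L.length := by omega
  have e1 : ('-' :: (PySem.Int.toChars 0 ++ ',' :: PySem.Int.toChars a1))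
      = ('-' :: (PySem.Int.toChars 0 ++ ',' :: PySem.Int.toChars b1)) := by
    have := congrArg (fun l => l[1]?) hsets
    simpa [List.getElem?_set, h1lt, Nat.lt_of_lt_of_le (by omega) (le_refl L.length)] using this
  have e2 : ('+' :: (PySem.Int.toChars 0 ++ ',' :: PySem.Int.toChars a2))
      = ('+' :: (PySem.Int.toChars 0 ++ ',' :: PySem.Int.toChars b2)) := by
    have := congrArg (fun l => l[2]?) hsets
    simpa [List.getElem?_set, h2lt] using this
  rw [show PySem.Int.toChars 0 = ['0'] from rfl] at e1 e2
  simp only [List.cons_append, List.nil_append, List.cons.injEq, true_and] at e1 e2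
  exact hne ⟨toChars_inj ha1 hb1 e1, toChars_inj ha2 hb2 e2⟩

-- under a true DgB flag, the carry-threaded rebuild and the per-hunk rebuild differ
theorem carry_ne : ∀ (gs : List (String × List String)),
    (∀ g ∈ gs, 3 ≤ (PySem.Str.split₀ g.1).length) →
    ∀ (ao an : Int) (c : Bool), 0 ≤ ao → 0 ≤ an →
    (c = true → 0 < ao + an) → (c = false → ao = 0 ∧ an = 0) →
    DgB gs c = true →
    fixHunksCarry gs ao an ≠ (gs.map fixHunk).flatten := by
  intro gs
  induction gs with
  | nil => intro _ ao an c _ _ _ _ hD; simp [DgB] at hD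
  | cons g t ih =>
    obtain ⟨h, b⟩ := g
    intro hlen ao an c hao han hct hcf hD
    have hnn := countBody_base_nonneg b
    rcases hp : parseHd h with _ | ⟨o, n⟩
    · simp only [DgB, hp, Option.isNone_none, if_true] at hD
      cases hc : c with
      | true =>
        have hpos := hct hc
        intro heq
        simp only [fixHunksCarry, hp, List.map_cons, List.flatten_cons, fixHunk,
          parseHdB_eq, Option.getD_none] at heq
        rw [countBody_shift b ao an] at heq
        have hhead : rebuildHd h 0 (ao + (countBody b 0 0).1) 0 (an + (countBody b 0 0).2)
            = rebuildHd h 0 (countBody b 0 0).1 0 (countBody b 0 0).2 := by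
          have := congrArg (fun l => l.headD "") heq
          simpa using this
        exact headNe h (ao + (countBody b 0 0).1) (an + (countBody b 0 0).2)
          (countBody b 0 0).1 (countBody b 0 0).2
          (by omega) (by omega) (by omega) (by omega)
          (hlen (h, b) (by simp))
          (by omega) hhead
      | false =>
        obtain ⟨hao0, han0⟩ := hcf hc
        subst hao0 han0
        rw [hc] at hD
        simp only [Bool.false_or] at hD
        intro heq
        simp only [fixHunksCarry, hp, List.map_cons, List.flatten_cons, fixHunk,
          parseHdB_eq, Option.getD_none] at heq
        have htail := List.append_cancel_left heq
        exact ih (fun g hg => hlen g (by simp [hg]))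
          (countBody b 0 0).1 (countBody b 0 0).2
          (b.any (fun x => !PySem.Str.startswith x "\\"))
          (by omega) (by omega)
          (fun h1 => countBody_base_pos b h1)
          (fun h0 => by
            have := countBody_any_false b h0 0 0
            constructor <;> simp [this])
          hD htail
    · simp only [DgB, hp, Option.isNone_some, Bool.false_eq_true, if_false] at hD
      intro heq
      simp only [fixHunksCarry, hp, List.map_cons, List.flatten_cons, fixHunk,
        parseHdB_eq, Option.getD_some] at heq
      have htail := List.append_cancel_left heq
      exact ih (fun g hg => hlen g (by simp [hg]))
        (countBody b 0 0).1 (countBody b 0 0).2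
        (b.any (fun x => !PySem.Str.startswith x "\\"))
        (by omega) (by omega)
        (fun h1 => countBody_base_pos b h1)
        (fun h0 => by
          have := countBody_any_false b h0 0 0
          constructor <;> simp [this])
        hD htail

-- every line of the splitlines decomposition is newline-free
theorem pvLines_nl (dl : List String) : ∀ l ∈ pvLines dl, ∀ c ∈ l.toList, c ≠ '\n' := by
  intro l hl c hc
  have h2 : l.toList ∈ PySem.Chars.splitlines (PySem.Str.join "\n" dl ++ "\n").toList := by
    rw [← PySem.Str.splitlines_map_toList]
    exact List.mem_map_of_mem hl
  unfold PySem.Chars.splitlines at h2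
  have h3 := splitlines_go_free _ _ [] [] (by simp) (by simp) _ h2 c hc
  intro hcn
  subst hcn
  simp at h3

-- a rebuilt hunk header never contains a newline
theorem rebuildHd_nl (s : String) (ho ao hn an : Int) :
    ∀ c ∈ (rebuildHd s ho ao hn an).toList, c ≠ '\n' := by
  intro c hc
  unfold rebuildHd at hc
  rw [PySem.Str.toList_join] at hc
  rw [show (" " : String).toList = [' '] from rfl] at hc
  simp only [List.map_set, String.toList_ofList] at hc
  rcases mem_join_single hc with hc | ⟨p, hp, hcp⟩
  · subst hc; decide
  · rcases List.mem_or_eq_of_mem_set hp with hp | hp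
    · rcases List.mem_or_eq_of_mem_set hp with hp | hp
      · rw [PySem.Str.split₀_map_toList] at hp
        have := split₀_nonspace s.toList p hp c hcp
        intro hcn; subst hcn; simp [PySem.Chars.isspace] at this
      · subst hp
        have := numtok_nonspace '-' (by decide) ho ao c hcp
        intro hcn; subst hcn; simp [PySem.Chars.isspace] at this
    · subst hp
      have := numtok_nonspace '+' (by decide) hn an c hcp
      intro hcn; subst hcn; simp [PySem.Chars.isspace] at this

-- "\n".join(...) + "\n" separates newline-free lines injectively
theorem out_ne (L1 L2 : List String)
    (h1 : ∀ l ∈ L1, ∀ c ∈ l.toList, c ≠ '\n') (h2 : ∀ l ∈ L2, ∀ c ∈ l.toList, c ≠ '\n')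
    (hn1 : L1 ≠ []) (hn2 : L2 ≠ []) (hne : L1 ≠ L2) :
    PySem.Str.join "\n" L1 ++ "\n" ≠ PySem.Str.join "\n" L2 ++ "\n" := by
  intro heq
  have htl := congrArg String.toList heq
  simp only [String.toList_append, PySem.Str.toList_join] at htl
  rw [show ("\n" : String).toList = ['\n'] from rfl] at htl
  have hjoin : PySem.Chars.join ['\n'] (List.map String.toList L1)
      = PySem.Chars.join ['\n'] (List.map String.toList L2) :=
    List.append_cancel_right htl
  rw [show ∀ P, PySem.Chars.join ['\n'] P = ['\n'].intercalate P from fun _ => rfl,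
      show ∀ P, PySem.Chars.join ['\n'] P = ['\n'].intercalate P from fun _ => rfl] at hjoin
  have hsp := congrArg (List.splitOn '\n') hjoin
  rw [List.splitOn_intercalate _ '\n'
        (by intro l hl hcl; obtain ⟨x, hx, rfl⟩ := List.mem_map.mp hl; exact h1 x hx '\n' hcl rfl) (by simpa using hn1),
      List.splitOn_intercalate _ '\n'
        (by intro l hl hcl; obtain ⟨x, hx, rfl⟩ := List.mem_map.mp hl; exact h2 x hx '\n' hcl rfl) (by simpa using hn2)] at hsp
  exact hne (List.map_injective_iff.mpr (fun a b hab => String.toList_inj.mp hab) hsp)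

-- elements of the carry-threaded rebuild satisfy any predicate holding of rebuilt headers and body lines
theorem mem_fixHunksCarry {P : String → Prop}
    (hre : ∀ (s : String) (a b c d : Int), P (rebuildHd s a b c d)) :
    ∀ (gs : List (String × List String)) (ao an : Int),
      (∀ g ∈ gs, ∀ x ∈ g.2, P x) → ∀ l ∈ fixHunksCarry gs ao an, P l := by
  intro gs
  induction gs with
  | nil => intro ao an _ l hl; simp [fixHunksCarry] at hl
  | cons g t ih =>
    obtain ⟨h, b⟩ := g
    intro ao an hb l hl
    rcases hp : parseHd h with _ | ⟨o, n⟩ <;>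
      simp only [fixHunksCarry, hp, List.cons_append, List.mem_cons, List.mem_append] at hl <;>
      [skip; skip] <;>
      (rcases hl with hl | hl | hl
       · subst hl; apply hre
       · exact hb (h, b) (by simp) l hl
       · exact ih _ _ (fun g hg => hb g (by simp [hg])) l hl)

theorem mem_fixHunks {P : String → Prop}
    (hre : ∀ (s : String) (a b c d : Int), P (rebuildHd s a b c d)) :
    ∀ (gs : List (String × List String)),
      (∀ g ∈ gs, ∀ x ∈ g.2, P x) → ∀ l ∈ (gs.map fixHunk).flatten, P l := by
  intro gs
  induction gs with
  | nil => intro _ l hl; simp at hl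
  | cons g t ih =>
    obtain ⟨h, b⟩ := g
    intro hb l hl
    simp only [List.map_cons, List.flatten_cons, fixHunk, List.cons_append, List.mem_cons,
      List.mem_append] at hl
    rcases hl with hl | hl | hl
    · subst hl; apply hre
    · exact hb (h, b) (by simp) l hl
    · exact ih (fun g hg => hb g (by simp [hg])) l hl

-- every header and body line of the hunk grouping is a line of the diff
theorem hunks_sub (dl : List String) :
    ∀ g ∈ pvHunks dl, g.1 ∈ pvLines dl ∧ ∀ x ∈ g.2, x ∈ pvLines dl := by
  intro g hg
  have hflat : flattenHunks (pvHunks dl) = (pvLines dl).dropWhile notHeader := by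
    rw [pvHunks_eq]
    unfold groupHunks
    exact flatten_groupHunksF _ _ (le_refl _)
  have hmem : ∀ x ∈ g.1 :: g.2, x ∈ pvLines dl := by
    intro x hx
    have : x ∈ flattenHunks (pvHunks dl) :=
      List.mem_flatten.mpr ⟨g.1 :: g.2, List.mem_map_of_mem hg, hx⟩
    rw [hflat] at this
    exact (List.dropWhile_sublist _).subset this
  exact ⟨hmem g.1 (by simp), fun x hx => hmem x (by simp [hx])⟩

theorem process_diff_for_unidiff_py_tight : Claim_exact_process_diff_for_unidiff_py := by
  unfold Claim_exact_process_diff_for_unidiff_py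
  intro dl _ hpre hD
  by_cases hnil : dl = []
  · subst hnil; exact absurd hD (by decide)
  · unfold D_process_diff_for_unidiff_py at hD
    rw [dlines_eq dl] at hD
    unfold process_diff_for_unidiff_py process_diff_for_unidiff_py_alt
    rw [if_neg hnil, if_neg hnil, A_eq_carry dl]
    show PySem.Str.join "\n" ((pvLines dl).takeWhile notHeader ++ fixHunksCarry (pvHunks dl) 0 0) ++ "\n"
      ≠ PySem.Str.join "\n" ((pvLines dl).takeWhile notHeader ++ ((pvHunks dl).map fixHunk).flatten) ++ "\n"
    have hprenl : ∀ l ∈ (pvLines dl).takeWhile notHeader, ∀ c ∈ l.toList, c ≠ '\n' :=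
      fun l hl => pvLines_nl dl l ((List.takeWhile_sublist _).subset hl)
    have hbodnl : ∀ g ∈ pvHunks dl, ∀ x ∈ g.2, ∀ c ∈ x.toList, c ≠ '\n' :=
      fun g hg x hx => pvLines_nl dl x ((hunks_sub dl g hg).2 x hx)
    have hcarrynl : ∀ l ∈ fixHunksCarry (pvHunks dl) 0 0, ∀ c ∈ l.toList, c ≠ '\n' :=
      mem_fixHunksCarry (fun s a b c d => rebuildHd_nl s a b c d) _ 0 0 hbodnl
    have hcleannl : ∀ l ∈ ((pvHunks dl).map fixHunk).flatten, ∀ c ∈ l.toList, c ≠ '\n' :=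
      mem_fixHunks (fun s a b c d => rebuildHd_nl s a b c d) _ hbodnl
    -- decompose the line list at the first hunk header
    cases hd : (pvLines dl).dropWhile notHeader with
    | nil =>
      exfalso
      have hpref : ∀ l ∈ (pvLines dl).takeWhile notHeader,
          PySem.Str.startswith l "@@" = false := by
        intro l hl
        have := List.mem_takeWhile_imp hl
        simpa [notHeader] using this
      rw [← List.takeWhile_append_dropWhile (p := notHeader) (l := pvLines dl), hd,
        scan_pre _ hpref] at hD
      simp [dScan] at hD
    | cons h1 t1 =>
      have hh1 : PySem.Str.startswith h1 "@@" = true := by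
        have := dropWhile_head_false notHeader (pvLines dl) h1 t1 hd
        simpa [notHeader] using this
      have hgs : pvHunks dl =
          (h1, t1.takeWhile notHeader) :: groupHunksF t1.length (t1.dropWhile notHeader) := by
        simp [pvHunks_eq, hd, groupHunks, groupHunksF]
      have hwf1 : ∀ l ∈ t1.takeWhile notHeader, PySem.Str.startswith l "@@" = false := by
        intro l hl
        have := List.mem_takeWhile_imp hl
        simpa [notHeader] using this
      have hwft : hunksWF (groupHunksF t1.length (t1.dropWhile notHeader)) := by
        intro g hg
        have hwf : hunksWF (pvHunks dl) := by
          rw [pvHunks_eq, hd]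
          apply wf_groupHunks
          intro x hx; simp at hx; subst hx; exact hh1
        exact hwf g (by rw [hgs]; exact List.mem_cons_of_mem _ hg)
      have hflat : flattenHunks (groupHunksF t1.length (t1.dropWhile notHeader))
          = t1.dropWhile notHeader :=
        flatten_groupHunksF t1.length _ (List.length_dropWhile_le _ _)
      have hpref : ∀ l ∈ (pvLines dl).takeWhile notHeader,
          PySem.Str.startswith l "@@" = false := by
        intro l hl
        have := List.mem_takeWhile_imp hl
        simpa [notHeader] using this
      -- drive the scanner to the remaining hunks: the carry flag fires there
      rw [← List.takeWhile_append_dropWhile (p := notHeader) (l := pvLines dl), hd,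
        scan_pre _ hpref] at hD
      have hh1' : PySem.Chars.startswith h1.toList ['@', '@'] = true := by simpa using hh1
      have hD2 : dScan t1 true false = true := by
        cases hdf : dFail h1 with
        | true => simpa [dScan, hh1', hdf] using hD
        | false => simpa [dScan, hh1', hdf] using hD
      rw [← List.takeWhile_append_dropWhile (p := notHeader) (l := t1), ← hflat,
        scan_body _ hwf1, scan_hunks _ hwft] at hD2
      simp only [Bool.false_or] at hD2
      -- token-count bound of Pre_ for the remaining hunk headers
      have hlenrest : ∀ g ∈ groupHunksF t1.length (t1.dropWhile notHeader),
          3 ≤ (PySem.Str.split₀ g.1).length := by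
        intro g hg
        have hgmem : g ∈ pvHunks dl := by rw [hgs]; exact List.mem_cons_of_mem _ hg
        exact hpre g.1 (hunks_sub dl g hgmem).1 (hwft g hg).1
      have hnn := countBody_base_nonneg (t1.takeWhile notHeader)
      have htailne : fixHunksCarry (groupHunksF t1.length (t1.dropWhile notHeader))
            (countBody (t1.takeWhile notHeader) 0 0).1 (countBody (t1.takeWhile notHeader) 0 0).2
          ≠ ((groupHunksF t1.length (t1.dropWhile notHeader)).map fixHunk).flatten :=
        carry_ne _ hlenrest _ _ _ (by omega) (by omega)
          (fun hpos => countBody_base_pos _ hpos)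
          (fun h0 => by
            have := countBody_any_false _ h0 0 0
            constructor <;> simp [this])
          hD2
      apply out_ne
      · intro l hl
        rcases List.mem_append.mp hl with hl | hl
        · exact hprenl l hl
        · exact hcarrynl l hl
      · intro l hl
        rcases List.mem_append.mp hl with hl | hl
        · exact hprenl l hl
        · exact hcleannl l hl
      · rw [hgs]
        rcases hp1 : parseHd h1 with _ | ⟨o, n⟩ <;>
          simp [fixHunksCarry, hp1]
      · rw [hgs]
        simp [fixHunk]
      · intro hle
        have hle2 := List.append_cancel_left hle
        rw [hgs] at hle2
        rcases hp1 : parseHd h1 with _ | ⟨o, n⟩ <;>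
          [simp only [fixHunksCarry, hp1, List.map_cons, List.flatten_cons, fixHunk,
             parseHdB_eq, Option.getD_none, List.cons_append, List.cons.injEq] at hle2;
           simp only [fixHunksCarry, hp1, List.map_cons, List.flatten_cons, fixHunk,
             parseHdB_eq, Option.getD_some, List.cons_append, List.cons.injEq] at hle2] <;>
          exact htailne (List.append_cancel_left hle2.2)
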